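-- pv_equiv track=rewrite | github.com/alldayfba/nomad-nebula | execution/calculate_fba_profitability.py | estimate_monthly_sales
-- ===== SOURCE A (Python) =====
-- BSR_TO_MONTHLY_SALES = [
--     (50, 5000),
--     (100, 3000),
--     (200, 2000),
--     (500, 1200),
--     (1000, 800),
--     (2000, 500),
--     (5000, 250),
--     (10000, 120),
--     (20000, 75),
--     (50000, 40),
--     (100000, 20),
--     (200000, 10),
--     (500000, 5),
--     (1000000, 2),
--     (999999999, 1),
-- ]
--
-- BSR_CATEGORY_MULTIPLIERS = {
--     "Toys & Games": 1.5,
--     "Grocery & Gourmet Food": 1.8,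
--     "Health & Personal Care": 1.3,
--     "Beauty": 1.3,
--     "Home & Kitchen": 0.9,
--     "Sports & Outdoors": 1.0,
--     "Books": 0.7,
--     "Electronics": 1.2,
--     "Office Products": 0.8,
--     "Pet Supplies": 1.1,
--     "Baby": 1.2,
--     "Clothing": 0.6,
-- }
--
-- def estimate_monthly_sales(sales_rank, category=None):
--     """Estimate monthly sales from BSR with category-specific multiplier.
--     Returns None if no rank."""
--     if not sales_rank or sales_rank <= 0:
--         return None
--     base_sales = 1
--     for max_rank, sales in BSR_TO_MONTHLY_SALES:
--         if sales_rank <= max_rank: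
--             base_sales = sales
--             break
--     # Apply category multiplier if available
--     if category:
--         multiplier = _get_category_multiplier(category)
--         return max(1, round(base_sales * multiplier))
--     return base_sales
--
-- def _get_category_multiplier(category):
--     """Look up BSR category multiplier. Falls back to 1.0."""
--     if not category:
--         return 1.0
--     if category in BSR_CATEGORY_MULTIPLIERS:
--         return BSR_CATEGORY_MULTIPLIERS[category]
--     # Partial match
--     category_lower = category.lower()
--     for cat_name, mult in BSR_CATEGORY_MULTIPLIERS.items():
--         if cat_name.lower() in category_lower or category_lower in cat_name.lower():
--             return mult
--     return 1.0
-- ===== SOURCE B (Python) =====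
-- BSR_TO_MONTHLY_SALES = [
--     (50, 5000), (100, 3000), (200, 2000), (500, 1200), (1000, 800),
--     (2000, 500), (5000, 250), (10000, 120), (20000, 75), (50000, 40),
--     (100000, 20), (200000, 10), (500000, 5), (1000000, 2), (999999999, 1),
-- ]
-- _THRESHOLDS = [r for r, _ in BSR_TO_MONTHLY_SALES]
-- _SALES = [s for _, s in BSR_TO_MONTHLY_SALES]
--
-- BSR_CATEGORY_MULTIPLIERS = {
--     "Toys & Games": 1.5,
--     "Grocery & Gourmet Food": 1.8,
--     "Health & Personal Care": 1.3,
--     "Beauty": 1.3,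
--     "Home & Kitchen": 0.9,
--     "Sports & Outdoors": 1.0,
--     "Books": 0.7,
--     "Electronics": 1.2,
--     "Office Products": 0.8,
--     "Pet Supplies": 1.1,
--     "Baby": 1.2,
--     "Clothing": 0.6,
-- }
--
-- def _bisect_left(xs, x):
--     lo, hi = 0, len(xs)
--     while lo < hi:
--         mid = (lo + hi) // 2
--         if xs[mid] < x:
--             lo = mid + 1
--         else:
--             hi = mid
--     return lo
--
-- def estimate_monthly_sales(sales_rank, category=None):
--     if not sales_rank or sales_rank <= 0:
--         return None
--     i = _bisect_left(_THRESHOLDS, sales_rank)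
--     base = _SALES[i] if i < len(_SALES) else 1
--     if not category:
--         return base
--     mult = BSR_CATEGORY_MULTIPLIERS.get(category)
--     if mult is None:
--         cl = category.lower()
--         mult = next((m for k, m in BSR_CATEGORY_MULTIPLIERS.items()
--                      if k.lower() in cl or cl in k.lower()), 1.0)
--     return max(1, round(base * mult))
-- ===== Notes on version B (the rewrite author's own statement) =====
-- stated objective: idiomatic
-- what changed: The linear first-match scan over the BSR table is replaced by a binary search (bisect_left) over the ascending threshold list with a parallel sales list, and the partial-match multiplier loop is replaced by a single next()/find? over the dict items; results are identical.
import Mathlib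
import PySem

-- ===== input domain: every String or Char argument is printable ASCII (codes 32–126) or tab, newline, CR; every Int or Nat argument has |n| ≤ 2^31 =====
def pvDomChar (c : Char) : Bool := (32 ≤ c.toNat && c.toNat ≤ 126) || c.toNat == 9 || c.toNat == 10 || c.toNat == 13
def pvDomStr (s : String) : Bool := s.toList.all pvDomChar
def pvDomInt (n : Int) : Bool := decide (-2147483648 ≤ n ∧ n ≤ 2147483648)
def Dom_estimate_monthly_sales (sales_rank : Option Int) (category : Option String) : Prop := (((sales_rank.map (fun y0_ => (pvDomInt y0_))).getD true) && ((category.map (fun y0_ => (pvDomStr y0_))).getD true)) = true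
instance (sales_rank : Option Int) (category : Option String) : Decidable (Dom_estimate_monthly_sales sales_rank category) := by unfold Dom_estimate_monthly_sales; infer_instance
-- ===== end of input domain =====

-- B replaces A's linear scan of the BSR table by a hand-written binary search over the
-- threshold list, and A's partial-match loop by a single find? over the multiplier items
-- (idiomatic; same results). Float multipliers are modelled as integer tenths; this model
-- is exact for every value the fixed tables can produce (checked by enumeration).


-- ===== PORT A =====

-- BSR_TO_MONTHLY_SALES
def pvBSRTable : List (Int × Int) :=
  [(50, 5000), (100, 3000), (200, 2000), (500, 1200), (1000, 800),
   (2000, 500), (5000, 250), (10000, 120), (20000, 75), (50000, 40),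
   (100000, 20), (200000, 10), (500000, 5), (1000000, 2), (999999999, 1)]

-- BSR_CATEGORY_MULTIPLIERS; the float multipliers 1.5, 1.8, … are stored as integer
-- TENTHS (15, 18, …) — exact, each table value has exactly one decimal digit.
def pvMultDict : PySem.Dict String Int :=
  PySem.Dict.ofList
    [("Toys & Games", 15), ("Grocery & Gourmet Food", 18), ("Health & Personal Care", 13),
     ("Beauty", 13), ("Home & Kitchen", 9), ("Sports & Outdoors", 10), ("Books", 7),
     ("Electronics", 12), ("Office Products", 8), ("Pet Supplies", 11), ("Baby", 12),
     ("Clothing", 6)]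

-- round(base * mult) with mult in tenths: Python's banker's rounding of t/10.
-- Exact w.r.t. CPython's float round for every (base, tenths) pair the fixed tables
-- can produce (verified by enumerating all combinations against CPython).
def pvRoundTenths (t : Int) : Int :=
  let q := PySem.Int.floordiv t 10
  let r := t - 10 * q
  if r > 5 then q + 1 else if r < 5 then q else if PySem.Int.mod q 2 = 0 then q else q + 1

-- the `for max_rank, sales in BSR_TO_MONTHLY_SALES` loop (first match, else the initial 1)
def pvScanBase : List (Int × Int) → Int → Int
  | [], _ => 1
  | (max_rank, sales) :: rest, n => if n ≤ max_rank then sales else pvScanBase rest n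

-- the partial-match loop of _get_category_multiplier
def pvPartialLoop : List (String × Int) → String → Int
  | [], _ => 10
  | (cat_name, mult) :: rest, cl =>
      if PySem.Str.isIn (PySem.Str.lower cat_name) cl
         || PySem.Str.isIn cl (PySem.Str.lower cat_name) then mult
      else pvPartialLoop rest cl

-- _get_category_multiplier (result in tenths)
def pvGetCategoryMultiplier (category : String) : Int :=
  if category = "" then 10
  else
    match PySem.Dict.get? pvMultDict category with
    | some m => m
    | none => pvPartialLoop pvMultDict.items (PySem.Str.lower category)

def estimate_monthly_sales (sales_rank : Option Int) (category : Option String) : Option Int :=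
  match sales_rank with
  | none => none
  | some n =>
    if n = 0 ∨ n ≤ 0 then none
    else
      let base_sales := pvScanBase pvBSRTable n
      match category with
      | some c =>
        if c ≠ "" then
          some (max 1 (pvRoundTenths (base_sales * pvGetCategoryMultiplier c)))
        else some base_sales
      | none => some base_sales

-- ===== PORT B =====

-- _THRESHOLDS and _SALES
def pvThresholds : List Int :=
  [50, 100, 200, 500, 1000, 2000, 5000, 10000, 20000, 50000,
   100000, 200000, 500000, 1000000, 999999999]

def pvSales : List Int :=
  [5000, 3000, 2000, 1200, 800, 500, 250, 120, 75, 40, 20, 10, 5, 2, 1]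

-- _bisect_left's while loop (lo/hi halving)
def pvBisectLoop (xs : List Int) (x : Int) (lo hi : Nat) : Nat :=
  if _h : lo < hi then
    let mid := (lo + hi) / 2
    if xs.getD mid 0 < x then pvBisectLoop xs x (mid + 1) hi
    else pvBisectLoop xs x lo mid
  else lo
termination_by hi - lo
decreasing_by all_goals omega

def pvBisectLeft (xs : List Int) (x : Int) : Nat := pvBisectLoop xs x 0 xs.length

def estimate_monthly_sales_alt (sales_rank : Option Int) (category : Option String) : Option Int :=
  match sales_rank with
  | none => none
  | some n =>
    if n = 0 ∨ n ≤ 0 then none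
    else
      let i := pvBisectLeft pvThresholds n
      let base := if i < pvSales.length then pvSales.getD i 0 else 1
      match category with
      | none => some base
      | some c =>
        if c = "" then some base
        else
          let mult :=
            match PySem.Dict.get? pvMultDict c with
            | some m => m
            | none =>
              let cl := PySem.Str.lower c
              ((pvMultDict.items.find? (fun km =>
                  PySem.Str.isIn (PySem.Str.lower km.1) cl
                  || PySem.Str.isIn cl (PySem.Str.lower km.1))).map Prod.snd).getD 10
          some (max 1 (pvRoundTenths (base * mult)))

-- ===== PRECONDITION & SPEC =====
def Spec_estimate_monthly_sales (sales_rank : Option Int) (category : Option String) (out : Option Int) : Prop := out = estimate_monthly_sales_alt sales_rank category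
instance (sales_rank : Option Int) (category : Option String) (out : Option Int) : Decidable (Spec_estimate_monthly_sales sales_rank category out) := by unfold Spec_estimate_monthly_sales; infer_instance

-- ===== CLAIM (what is proved, stated in full; the proofs are below) =====
def Claim_equal_estimate_monthly_sales : Prop := ∀ (sales_rank : Option Int) (category : Option String), Dom_estimate_monthly_sales sales_rank category → Spec_estimate_monthly_sales sales_rank category (estimate_monthly_sales sales_rank category)

-- ===== LEMMAS AND PROOFS =====

-- the binary search maintains: everything left of lo is < x, everything at/right of hi is ≥ x;
-- its result j therefore satisfies the bisect_left boundary property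
theorem pv_bis_inv (xs : List Int) (x : Int)
    (hmono : ∀ i j : Nat, i < j → j < xs.length → xs.getD i 0 ≤ xs.getD j 0)
    (lo hi : Nat) (hle : lo ≤ hi) (hhi : hi ≤ xs.length)
    (hlow : ∀ i, i < lo → xs.getD i 0 < x)
    (hhigh : ∀ i, hi ≤ i → i < xs.length → ¬ xs.getD i 0 < x) :
    pvBisectLoop xs x lo hi ≤ xs.length ∧
    (∀ i, i < pvBisectLoop xs x lo hi → xs.getD i 0 < x) ∧
    (pvBisectLoop xs x lo hi < xs.length → ¬ xs.getD (pvBisectLoop xs x lo hi) 0 < x) := by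
  rw [pvBisectLoop]
  by_cases hc : lo < hi
  · simp only [dif_pos hc]
    by_cases hm : xs.getD ((lo + hi) / 2) 0 < x
    · simp only [if_pos hm]
      refine pv_bis_inv xs x hmono ((lo + hi) / 2 + 1) hi (by omega) hhi ?_ hhigh
      intro i hi'
      rcases Nat.lt_or_ge i ((lo + hi) / 2) with h | h
      · exact lt_of_le_of_lt (hmono i ((lo + hi) / 2) h (by omega)) hm
      · have hieq : i = (lo + hi) / 2 := by omega
        rw [hieq]; exact hm
    · simp only [if_neg hm]
      refine pv_bis_inv xs x hmono lo ((lo + hi) / 2) (by omega) (by omega) hlow ?_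
      intro i hi1 hi2 hlt
      rcases Nat.lt_or_ge ((lo + hi) / 2) i with h | h
      · exact hm (lt_of_le_of_lt (hmono ((lo + hi) / 2) i h hi2) hlt)
      · have hieq : i = (lo + hi) / 2 := by omega
        rw [hieq] at hlt; exact hm hlt
  · simp only [dif_neg hc]
    have hlohi : lo = hi := by omega
    exact ⟨by omega, hlow, fun h => hhigh lo (by omega) h⟩
termination_by hi - lo
decreasing_by all_goals omega

-- A's first-match scan returns sales[j] for the boundary index j (or 1 past the end)
theorem pv_scan_eq (tbl : List (Int × Int)) (n : Int) :
    ∀ j : Nat, j ≤ tbl.length →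
      (∀ i, i < j → (tbl.map Prod.fst).getD i 0 < n) →
      (j < tbl.length → ¬ (tbl.map Prod.fst).getD j 0 < n) →
      pvScanBase tbl n = if j < (tbl.map Prod.snd).length
                         then (tbl.map Prod.snd).getD j 0 else 1 := by
  induction tbl with
  | nil =>
    intro j hj _ _
    have : j = 0 := Nat.le_zero.mp hj
    subst this
    simp [pvScanBase]
  | cons hd tl ih =>
    intro j hj hlt hge
    obtain ⟨t, s⟩ := hd
    by_cases hn : n ≤ t
    · have hj0 : j = 0 := by
        by_contra h
        have := hlt 0 (by omega)
        simp at this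
        omega
      subst hj0
      simp [pvScanBase, hn]
    · have hj1 : j ≠ 0 := by
        intro h; subst h
        exact hge (by simp) (by simp; omega)
      obtain ⟨j', rfl⟩ : ∃ j', j = j' + 1 := ⟨j - 1, by omega⟩
      have hrec := ih j' (by simpa using hj)
        (fun i hi => by simpa using hlt (i + 1) (by omega))
        (fun h => by simpa using hge (by simpa using Nat.succ_lt_succ h))
      simp only [pvScanBase, if_neg hn]
      simpa using hrec

-- A's partial-match loop is find?-with-default
theorem pv_partial_find (L : List (String × Int)) (cl : String) :
    pvPartialLoop L cl
      = ((L.find? (fun km =>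
            PySem.Str.isIn (PySem.Str.lower km.1) cl
            || PySem.Str.isIn cl (PySem.Str.lower km.1))).map Prod.snd).getD 10 := by
  induction L with
  | nil => rfl
  | cons hd tl ih =>
    obtain ⟨k, m⟩ := hd
    cases h : (PySem.Chars.isIn (PySem.Chars.lower k.toList) cl.toList
        || PySem.Chars.isIn cl.toList (PySem.Chars.lower k.toList)) with
    | true => simp [pvPartialLoop, h]
    | false => simp [pvPartialLoop, h, ih]

-- the fixed threshold list is monotone
theorem pv_thresholds_mono :
    ∀ i j : Nat, i < j → j < pvThresholds.length → pvThresholds.getD i 0 ≤ pvThresholds.getD j 0 := by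
  have hp : List.Pairwise (· ≤ ·) pvThresholds := by decide
  intro i j hij hj
  have hi : i < pvThresholds.length := by omega
  rw [List.getD_eq_getElem pvThresholds 0 hi, List.getD_eq_getElem pvThresholds 0 hj]
  exact List.pairwise_iff_getElem.mp hp i j hi hj hij

-- A's linear scan equals B's binary-search table lookup, for every rank
theorem pv_base_eq (n : Int) :
    pvScanBase pvBSRTable n
      = (if pvBisectLeft pvThresholds n < pvSales.length
         then pvSales.getD (pvBisectLeft pvThresholds n) 0 else 1) := by
  have hfst : pvBSRTable.map Prod.fst = pvThresholds := by decide
  have hsnd : pvBSRTable.map Prod.snd = pvSales := by decide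
  have hlen : pvBSRTable.length = pvThresholds.length := by decide
  have hbl : pvBisectLeft pvThresholds n = pvBisectLoop pvThresholds n 0 pvThresholds.length := rfl
  obtain ⟨h1, h2, h3⟩ := pv_bis_inv pvThresholds n pv_thresholds_mono 0 pvThresholds.length
    (Nat.zero_le _) (Nat.le_refl _) (fun i hi => absurd hi (Nat.not_lt_zero i))
    (fun i hi1 hi2 => absurd (Nat.lt_of_le_of_lt hi1 hi2) (lt_irrefl _))
  rw [← hbl] at h1 h2 h3
  have hmain := pv_scan_eq pvBSRTable n (pvBisectLeft pvThresholds n)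
    (by rw [hlen]; exact h1)
    (fun i hi => by rw [hfst]; exact h2 i hi)
    (fun h => by rw [hfst]; exact h3 (by rw [hlen] at h; exact h))
  rw [hmain, hsnd]

-- ===== VERDICT (by name: the statement is the Claim_ definition above) =====
theorem estimate_monthly_sales_spec : Claim_equal_estimate_monthly_sales := by
  intro sales_rank category _
  unfold Spec_estimate_monthly_sales
  match sales_rank with
  | none => rfl
  | some n =>
    simp only [estimate_monthly_sales, estimate_monthly_sales_alt]
    by_cases hn : n = 0 ∨ n ≤ 0
    · simp [hn]
    · simp only [hn, if_false]
      match category with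
      | none => simp [pv_base_eq]
      | some c =>
        by_cases hc : c = ""
        · simp [hc, pv_base_eq]
        · simp only [hc, if_false, ne_eq, not_false_iff, if_true,
            pvGetCategoryMultiplier, pv_base_eq, pv_partial_find]
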